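-- pv_equiv track=rewrite | github.com/syt06162/Algorithm-Study | python-for-coding-test/Ch11_06_greedy.py | solution
-- ===== SOURCE A (Python) =====
-- import heapq
--
-- def solution(food_times, k):
--     # -1인 경우
--     if sum(food_times) <= k:
--         return -1
--
--     length = len(food_times) # 현재 남은 길이를 뜻함. 바뀔 수 있음
--
--     Q = []
--     for i in range(length):
--         heapq.heappush(Q, (food_times[i], i)) # 음식수, 인덱스
--
--     time = 0 # 돌아간 바퀴 수
--     while True:
--
--         n, idx = heapq.heappop(Q)
--         realN = n - time # realN = 실제n값에서 돌아간 바퀴수를 빼야 진짜 남은 음식수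
--
--         # 이 접시 다 먹을동안 돌아도 안끝나면
--         if realN*length <= k:
--             time += realN # realN 바퀴만큼 돌기
--             k -= realN*length # 바퀴수*현재길이
--             length -= 1 # 이제 이 음식은 다 먹은거니 접시 다음부터 카운트 안함
--
--         # 이 접시 다 먹기전 종료면
--         else:
--             # Q에 남은 것들 다 index 기준으로 정렬 - 계산해서 리턴
--             leftList = []
--             leftList.append(idx)
--             while Q:
--                 temp, idx = heapq.heappop(Q)
--                 leftList.append(idx)
--             leftList.sort()
--             return leftList[(k) % len(leftList)] + 1
-- ===== SOURCE B (Python) =====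
-- def _eaten(food_times, t):
--     # seconds spent once every dish has been eaten down to level t
--     return sum(min(x, t) for x in food_times)
--
-- def solution(food_times, k):
--     # binary search on the final "level" T instead of simulating the rotation
--     if sum(food_times) <= k:
--         return -1
--     n = len(food_times)
--     lo = min(min(food_times), k // n)      # _eaten(lo) = n*lo <= k
--     hi = max(food_times) - 1               # _eaten(hi+1) = total > k
--     while lo < hi:
--         mid = (lo + hi + 1) // 2
--         if _eaten(food_times, mid) <= k:
--             lo = mid
--         else:
--             hi = mid - 1
--     rem = k - _eaten(food_times, lo)
--     survivors = [i for i, t in enumerate(food_times) if t > lo]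
--     return survivors[rem % len(survivors)] + 1
-- ===== Notes on version B (the rewrite author's own statement) =====
-- stated objective: alternative
-- what changed: Replaces A's heap simulation of the rotation (heappush/heappop in value order, mutating a length counter and draining the heap for the survivors) by a binary search on the final food level T (largest T with sum(min(t,T)) <= k), then reads the surviving indices and the remaining offset directly from that level.
import Mathlib
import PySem

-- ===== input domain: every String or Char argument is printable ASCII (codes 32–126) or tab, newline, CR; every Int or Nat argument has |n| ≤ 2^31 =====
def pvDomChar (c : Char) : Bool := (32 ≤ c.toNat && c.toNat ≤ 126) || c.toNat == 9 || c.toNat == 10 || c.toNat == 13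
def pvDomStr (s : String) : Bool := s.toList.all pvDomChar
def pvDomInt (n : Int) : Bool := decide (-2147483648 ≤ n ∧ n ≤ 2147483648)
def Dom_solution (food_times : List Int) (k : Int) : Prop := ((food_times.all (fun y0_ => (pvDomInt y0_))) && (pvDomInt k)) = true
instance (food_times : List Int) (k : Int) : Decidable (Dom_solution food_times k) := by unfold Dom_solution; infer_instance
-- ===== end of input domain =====

-- B replaces A's heap simulation of the rotation by a binary search on the final food level T
-- (largest T with sum(min(t,T)) <= k), then indexes the surviving dishes directly (alternative algorithm).

-- ===== PORT A =====
-- Python tuple comparison (a1,a2) < (b1,b2) on Int pairs: a1 < b1, or not b1 < a1 (i.e. a1 == b1) and a2 < b2.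
def pairLt (a b : Int × Int) : Bool := decide (a.1 < b.1) || (!decide (b.1 < a.1) && decide (a.2 < b.2))

-- A's heap of (food count, index) pairs, modelled as a list kept in pop order:
-- heappush = ordered insert by pairLt, heappop = take the head (the minimum).
-- A's while-True loop; `length` carried exactly as A's mutable variable; the [] case is
-- heappop of an empty heap (IndexError), outside Pre_solution.
def heapLoop : List (Int × Int) → Int → Int → Int → Int
  | [], _, _, _ => 0
  | (n, idx) :: rest, time, k, length =>
    let realN := n - time
    if realN * length ≤ k then
      heapLoop rest (time + realN) (k - realN * length) (length - 1)
    else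
      -- leftList: first idx, then popping the rest of the heap yields its indices in pop order; then leftList.sort()
      let leftList := PySem.List.sorted (idx :: rest.map Prod.snd) (fun x => x) false
      PySem.List.pyGetD leftList (PySem.Int.mod k (leftList.length : Int)) 0 + 1

def solution (food_times : List Int) (k : Int) : Int :=
  if food_times.sum ≤ k then -1
  else
    heapLoop
      ((PySem.List.pyRange 0 (food_times.length : Int) 1).foldl
        (fun acc i => PySem.List.insertBy pairLt (PySem.List.pyGetD food_times i 0, i) acc) [])
      0 k (food_times.length : Int)

-- ===== PORT B =====
-- Source B's helper _eaten: sum(min(x, t) for x in food_times)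
def eaten (food_times : List Int) (t : Int) : Int :=
  (food_times.map (fun x => min x t)).sum

-- Source B's while-loop: binary search for the largest T in [lo, hi] with eaten(T) <= k.
-- fuel = size of the interval + 1 bounds the iterations (each step shrinks hi - lo).
def bloop (food_times : List Int) (k : Int) : Nat → Int → Int → Int
  | 0, lo, _ => lo
  | fuel + 1, lo, hi =>
    if lo < hi then
      let mid := PySem.Int.floordiv (lo + hi + 1) 2
      if eaten food_times mid ≤ k then bloop food_times k fuel mid hi
      else bloop food_times k fuel lo (mid - 1)
    else lo

def solution_alt (food_times : List Int) (k : Int) : Int :=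
  if food_times.sum ≤ k then -1
  else
    let n : Int := (food_times.length : Int)
    -- min(food_times) / max(food_times): raise on [], unreachable here inside Pre_solution
    let lo := min ((PySem.List.min? food_times (fun y => y)).getD 0) (PySem.Int.floordiv k n)
    let hi := ((PySem.List.max? food_times (fun y => y)).getD 0) - 1
    let T := bloop food_times k ((hi - lo).toNat + 1) lo hi
    let rem := k - eaten food_times T
    let survivors := ((PySem.List.enumerate food_times 0).filter (fun p => decide (T < p.2))).map Prod.fst
    PySem.List.pyGetD survivors (PySem.Int.mod rem (survivors.length : Int)) 0 + 1

-- ===== PRECONDITION & SPEC =====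
-- Pre_ excludes only the inputs on which A raises: the empty list with k < 0 (heappop of an empty heap, IndexError).
def Pre_solution (food_times : List Int) (k : Int) : Prop := food_times ≠ [] ∨ 0 ≤ k
instance (food_times : List Int) (k : Int) : Decidable (Pre_solution food_times k) := by unfold Pre_solution; infer_instance
def pvWitness_solution : List Int × Int := ([3, 1, 2], 5)

def Spec_solution (food_times : List Int) (k : Int) (out : Int) : Prop := out = solution_alt food_times k
instance (food_times : List Int) (k : Int) (out : Int) : Decidable (Spec_solution food_times k out) := by unfold Spec_solution; infer_instance

-- ===== CLAIM (what is proved, stated in full; the proofs are below) =====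
def Claim_equal_solution : Prop := ∀ (food_times : List Int) (k : Int), Dom_solution food_times k → Pre_solution food_times k → Spec_solution food_times k (solution food_times k)

-- ===== LEMMAS AND PROOFS =====

-- proof-side intermediate: the heap loop read off along the sorted pair list
def sweepLoop : List (Int × Int) → Int → Int → Int
  | [], _, _ => -1
  | (t, i) :: rest, prev, k =>
    let block := (t - prev) * (1 + (rest.length : Int))
    if block > k then
      let survivors := PySem.List.sorted (i :: rest.map Prod.snd) (fun x => x) false
      PySem.List.pyGetD survivors (PySem.Int.mod k (1 + (rest.length : Int))) 0 + 1
    else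
      sweepLoop rest t (k - block)

-- A's push loop builds exactly the sorted pair list (sorted2 IS a fold of ordered inserts, same comparison).
theorem build_eq_sorted (food_times : List Int) :
    (PySem.List.pyRange 0 (food_times.length : Int) 1).foldl
      (fun acc i => PySem.List.insertBy pairLt (PySem.List.pyGetD food_times i 0, i) acc) []
    = PySem.List.sorted2 ((PySem.List.enumerate food_times 0).map (fun p => (p.2, p.1)))
        Prod.fst Prod.snd false := by
  rw [PySem.List.enumerate_eq_map_pyRange food_times 0, List.map_map]
  simp only [PySem.List.sorted2, PySem.List.len_eq, Bool.false_eq_true, if_false]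
  rw [List.foldl_map]
  rfl

-- length of the sorted pair list = len(food_times)
theorem length_build (food_times : List Int) :
    ((PySem.List.sorted2 ((PySem.List.enumerate food_times 0).map (fun p => (p.2, p.1)))
        Prod.fst Prod.snd false).length : Int) = (food_times.length : Int) := by
  have h := (PySem.List.sorted2_perm ((PySem.List.enumerate food_times 0).map (fun p => (p.2, p.1)))
        Prod.fst Prod.snd false).length_eq
  simp [h, PySem.List.length_enumerate]

-- A's loop equals the sweep, given A's invariants: the length counter is the heap size and
-- k is strictly below the total remaining food (so the heap is never popped empty).
theorem loop_eq (Q : List (Int × Int)) (time k : Int) (hne : Q ≠ [])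
    (hI : k < (Q.map Prod.fst).sum - time * (Q.length : Int)) :
    heapLoop Q time k (Q.length : Int) = sweepLoop Q time k := by
  induction Q generalizing time k with
  | nil => exact absurd rfl hne
  | cons p rest ih =>
    obtain ⟨n, idx⟩ := p
    simp only [heapLoop, sweepLoop, List.map_cons, List.sum_cons, List.length_cons] at hI ⊢
    have hc2 : ((rest.length + 1 : Nat) : Int) = 1 + (rest.length : Int) := by push_cast; ring
    rw [hc2] at hI ⊢
    by_cases hc : (n - time) * (1 + (rest.length : Int)) ≤ k
    · rw [if_pos hc, if_neg (not_lt.mpr hc)]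
      have hrne : rest ≠ [] := by
        rintro rfl
        simp only [List.length_nil, List.map_nil, List.sum_nil, Nat.cast_zero] at hc hI
        nlinarith
      have e1 : time + (n - time) = n := by ring
      have e2 : 1 + (rest.length : Int) - 1 = (rest.length : Int) := by ring
      rw [e1, e2]
      refine ih _ _ hrne ?_
      have ex : k - (n - time) * (1 + (rest.length : Int)) -
          ((rest.map Prod.fst).sum - n * (rest.length : Int)) =
          k - (n + (rest.map Prod.fst).sum - time * (1 + (rest.length : Int))) := by ring
      linarith [hI, ex]
    · rw [if_neg hc, if_pos (not_le.mp hc)]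
      have hlen : ((PySem.List.sorted (idx :: rest.map Prod.snd) (fun x => x) false).length : Int)
          = 1 + (rest.length : Int) := by
        rw [PySem.List.length_sorted]
        push_cast [List.length_cons, List.length_map]
        ring
      rw [hlen]

-- pairLt facts
theorem pairLt_asym (a b : Int × Int) (h : pairLt a b = true) : pairLt b a = false := by
  obtain ⟨a1, a2⟩ := a; obtain ⟨b1, b2⟩ := b
  simp only [pairLt] at h ⊢
  simp only [Bool.or_eq_true, Bool.and_eq_true, Bool.not_eq_true', decide_eq_true_eq,
    decide_eq_false_iff_not, Bool.or_eq_false_iff, Bool.and_eq_false_iff,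
    Bool.not_eq_false'] at h ⊢
  omega

theorem pairLt_trans (a b c : Int × Int) (h1 : pairLt a b = true) (h2 : pairLt b c = true) :
    pairLt a c = true := by
  obtain ⟨a1, a2⟩ := a; obtain ⟨b1, b2⟩ := b; obtain ⟨c1, c2⟩ := c
  simp only [pairLt] at h1 h2 ⊢
  simp only [Bool.or_eq_true, Bool.and_eq_true, Bool.not_eq_true', decide_eq_true_eq,
    decide_eq_false_iff_not] at h1 h2 ⊢
  omega

theorem pairLt_false_fst_le (a b : Int × Int) (h : pairLt b a = false) : a.1 ≤ b.1 := by
  obtain ⟨a1, a2⟩ := a; obtain ⟨b1, b2⟩ := b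
  simp only [pairLt, Bool.or_eq_false_iff, Bool.and_eq_false_iff, Bool.not_eq_false',
    decide_eq_false_iff_not, decide_eq_true_eq] at h
  omega

-- ordered insert preserves sortedness (in the form 'no later element is pairLt-smaller')
theorem insertBy_pairwise (x : Int × Int) (ys : List (Int × Int))
    (h : ys.Pairwise (fun a b => pairLt b a = false)) :
    (PySem.List.insertBy pairLt x ys).Pairwise (fun a b => pairLt b a = false) := by
  induction ys with
  | nil => simp [PySem.List.insertBy]
  | cons y t ih =>
    rw [List.pairwise_cons] at h
    obtain ⟨hy, ht⟩ := h
    by_cases hc : pairLt x y = true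
    · have : PySem.List.insertBy pairLt x (y :: t) = x :: y :: t := by
        simp [PySem.List.insertBy, hc]
      rw [this]
      refine List.Pairwise.cons ?_ (List.Pairwise.cons hy ht)
      intro z hz
      rcases List.mem_cons.mp hz with rfl | hzt
      · exact pairLt_asym _ _ hc
      · by_contra hzx
        have hzx' : pairLt z x = true := by
          cases hzx2 : pairLt z x
          · exact absurd hzx2 hzx
          · rfl
        have := pairLt_trans _ _ _ hzx' hc
        rw [hy z hzt] at this
        exact Bool.false_ne_true this
    · have hcf : pairLt x y = false := by
        cases hc2 : pairLt x y
        · rfl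
        · exact absurd hc2 hc
      have : PySem.List.insertBy pairLt x (y :: t) = y :: PySem.List.insertBy pairLt x t := by
        simp [PySem.List.insertBy, hcf]
      rw [this]
      refine List.Pairwise.cons ?_ (ih ht)
      intro z hz
      rcases (PySem.List.mem_insertBy pairLt x z t).mp hz with rfl | hzt
      · exact hcf
      · exact hy z hzt

theorem foldl_insertBy_pairwise (xs : List (Int × Int)) :
    (xs.foldl (fun acc x => PySem.List.insertBy pairLt x acc) []).Pairwise
      (fun a b => pairLt b a = false) := by
  suffices h : ∀ acc : List (Int × Int), acc.Pairwise (fun a b => pairLt b a = false) →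
      (xs.foldl (fun acc x => PySem.List.insertBy pairLt x acc) acc).Pairwise
        (fun a b => pairLt b a = false) from h [] (by simp)
  induction xs with
  | nil => intro acc h; simpa using h
  | cons x t ih => intro acc h; exact ih _ (insertBy_pairwise x acc h)

-- the sorted pair list is nondecreasing in its first components
theorem pairwise_fst_sorted2 (food_times : List Int) :
    (PySem.List.sorted2 ((PySem.List.enumerate food_times 0).map (fun p => (p.2, p.1)))
        Prod.fst Prod.snd false).Pairwise (fun a b => a.1 ≤ b.1) := by
  have he : PySem.List.sorted2 ((PySem.List.enumerate food_times 0).map (fun p => (p.2, p.1)))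
        Prod.fst Prod.snd false
      = ((PySem.List.enumerate food_times 0).map (fun p => (p.2, p.1))).foldl
        (fun acc x => PySem.List.insertBy pairLt x acc) [] := by
    simp only [PySem.List.sorted2, Bool.false_eq_true, if_false]
    rfl
  rw [he]
  exact (foldl_insertBy_pairwise _).imp (fun h => pairLt_false_fst_le _ _ h)

-- THE SWEEP, READ OFF AGAINST THE LEVEL T: if eaten-to-level-T fits in k but eaten-to-level-(T+1)
-- does not (both relative to prev), the sweep stops exactly at the first dish above T.
theorem sweep_main (T : Int) (L : List (Int × Int)) :
    ∀ (prev k : Int),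
    L.Pairwise (fun a b => a.1 ≤ b.1) →
    (L.map (fun p => min p.1 T - prev)).sum ≤ k →
    k < (L.map (fun p => min p.1 (T + 1) - prev)).sum →
    sweepLoop L prev k =
      PySem.List.pyGetD
        (PySem.List.sorted ((L.filter (fun p => decide (T < p.1))).map Prod.snd) (fun x => x) false)
        (PySem.Int.mod (k - (L.map (fun p => min p.1 T - prev)).sum)
          (((L.filter (fun p => decide (T < p.1))).length : Int))) 0 + 1 := by
  induction L with
  | nil =>
    intro prev k _ hle hgt
    simp only [List.map_nil, List.sum_nil] at hle hgt
    omega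
  | cons p rest ih =>
    obtain ⟨t, i⟩ := p
    intro prev k hpw hle hgt
    rw [List.pairwise_cons] at hpw
    obtain ⟨hhead, hpwr⟩ := hpw
    simp only [List.map_cons, List.sum_cons] at hle hgt
    simp only [sweepLoop]
    by_cases hstop : (t - prev) * (1 + (rest.length : Int)) > k
    · rw [if_pos hstop]
      -- the head dish is not finished: T < t
      have hTt : T < t := by
        by_contra hc
        push_neg at hc
        have h1 : ∀ q ∈ rest, (fun _ : Int × Int => t - prev) q ≤
            (fun q : Int × Int => min q.1 T - prev) q := by
          intro q hq
          have := hhead q hq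
          simp only []
          omega
        have hsum := List.sum_le_sum h1
        rw [PySem.List.sum_map_const_int] at hsum
        have hmt : min t T = t := min_eq_left hc
        rw [hmt] at hle
        have hr : (t - prev) * (1 + (rest.length : Int))
            = (t - prev) + (rest.length : Int) * (t - prev) := by ring
        linarith
      -- so every remaining dish is above level T
      have hallgt : ∀ q ∈ (t, i) :: rest, T < q.1 := by
        intro q hq
        rcases List.mem_cons.mp hq with rfl | hq'
        · exact hTt
        · exact lt_of_lt_of_le hTt (hhead q hq')
      have hfilter : ((t, i) :: rest).filter (fun q => decide (T < q.1)) = (t, i) :: rest :=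
        List.filter_eq_self.mpr (fun q hq => by simpa using hallgt q hq)
      have hsumT : (((t, i) :: rest).map (fun q => min q.1 T - prev)).sum
          = (1 + (rest.length : Int)) * (T - prev) := by
        have hcg : ∀ q ∈ (t, i) :: rest, (fun q : Int × Int => min q.1 T - prev) q
            = (fun _ : Int × Int => T - prev) q := by
          intro q hq
          have := hallgt q hq
          simp only []
          omega
        rw [List.map_congr_left hcg, PySem.List.sum_map_const_int]
        push_cast [List.length_cons]
        ring
      rw [hfilter]
      simp only [List.map_cons, List.sum_cons, List.length_cons, List.map_cons]
      have hm : (0 : Int) < 1 + (rest.length : Int) := by positivity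
      have hlen : (((rest.length + 1 : Nat)) : Int) = 1 + (rest.length : Int) := by
        push_cast; ring
      rw [hlen]
      have hnum : PySem.Int.mod k (1 + (rest.length : Int))
          = PySem.Int.mod (k - (min t T - prev + (rest.map (fun q => min q.1 T - prev)).sum))
              (1 + (rest.length : Int)) := by
        rw [PySem.Int.mod_eq_emod_of_pos hm, PySem.Int.mod_eq_emod_of_pos hm]
        have : min t T - prev + (rest.map (fun q => min q.1 T - prev)).sum
            = (1 + (rest.length : Int)) * (T - prev) := by
          simpa [List.map_cons, List.sum_cons] using hsumT
        rw [this, Int.sub_mul_emod_self_left]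
      rw [hnum]
    · rw [if_neg hstop]
      push_neg at hstop
      -- the head dish is finished: t ≤ T
      have htT : t ≤ T := by
        by_contra hc
        push_neg at hc
        have hcg : ∀ q ∈ (t, i) :: rest, (fun q : Int × Int => min q.1 (T + 1) - prev) q
            = (fun _ : Int × Int => T + 1 - prev) q := by
          intro q hq
          have hq1 : t ≤ q.1 := by
            rcases List.mem_cons.mp hq with rfl | hq'
            · exact le_refl _
            · exact hhead q hq'
          simp only []
          omega
        have hs2 : (((t, i) :: rest).map (fun q => min q.1 (T + 1) - prev)).sum
            = (1 + (rest.length : Int)) * (T + 1 - prev) := by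
          rw [List.map_congr_left hcg, PySem.List.sum_map_const_int]
          push_cast [List.length_cons]
          ring
        simp only [List.map_cons, List.sum_cons] at hs2
        have hmono : (1 + (rest.length : Int)) * (T + 1 - prev)
            ≤ (1 + (rest.length : Int)) * (t - prev) := by
          apply mul_le_mul_of_nonneg_left (by omega) (by positivity)
        rw [mul_comm] at hstop
        linarith
      have hmtT : min t T = t := min_eq_left htT
      have hmtT1 : min t (T + 1) = t := min_eq_left (by omega)
      -- shift the base of the remaining sums from prev to t
      have hsplit : ∀ S : Int, (rest.map (fun q => min q.1 S - prev)).sum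
          = (rest.map (fun q => min q.1 S - t)).sum + (rest.length : Int) * (t - prev) := by
        intro S
        have hf : (fun q : Int × Int => min q.1 S - prev)
            = (fun q : Int × Int => (min q.1 S - t) + (t - prev)) := by
          funext q; ring
        rw [hf, PySem.List.sum_map_add_int, PySem.List.sum_map_const_int]
      rw [ih t (k - (t - prev) * (1 + (rest.length : Int))) hpwr
        (by have := hsplit T; rw [hmtT] at hle; nlinarith [hsplit T])
        (by rw [hmtT1] at hgt; nlinarith [hsplit (T + 1)])]
      have hfc : ((t, i) :: rest).filter (fun q => decide (T < q.1))
          = rest.filter (fun q => decide (T < q.1)) := by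
        rw [List.filter_cons]
        simp [not_lt.mpr htT]
      rw [hfc]
      have hnum2 : k - (t - prev) * (1 + (rest.length : Int))
            - (rest.map (fun q => min q.1 T - t)).sum
          = k - (min t T - prev + (rest.map (fun q => min q.1 T - prev)).sum) := by
        rw [hmtT, hsplit T]; ring
      rw [hnum2]
      simp only [List.map_cons, List.sum_cons]

theorem bloop_char_aux (food_times : List Int) (k : Int) :
    ∀ (fuel : Nat) (lo hi : Int), (hi - lo).toNat < fuel → lo ≤ hi →
      eaten food_times lo ≤ k → k < eaten food_times (hi + 1) →
      lo ≤ bloop food_times k fuel lo hi ∧ bloop food_times k fuel lo hi ≤ hi ∧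
      eaten food_times (bloop food_times k fuel lo hi) ≤ k ∧
      k < eaten food_times (bloop food_times k fuel lo hi + 1) := by
  intro fuel
  induction fuel with
  | zero => intro lo hi hN; omega
  | succ N ih =>
    intro lo hi hN hle hlo hhi
    by_cases h1 : lo < hi
    · have hb := PySem.Int.floordiv_two_mid_bounds (lo := lo + 1) (hi := hi) (by omega)
      have he : lo + 1 + hi = lo + hi + 1 := by ring
      rw [he] at hb
      rw [bloop, if_pos h1]
      by_cases h2 : eaten food_times (PySem.Int.floordiv (lo + hi + 1) 2) ≤ k
      · simp only [h2, if_pos]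
        obtain ⟨ha, hbb, hcc, hdd⟩ :=
          ih (PySem.Int.floordiv (lo + hi + 1) 2) hi (by omega) (by omega) h2 hhi
        exact ⟨by omega, hbb, hcc, hdd⟩
      · simp only [h2, if_false]
        have h2' : k < eaten food_times (PySem.Int.floordiv (lo + hi + 1) 2 - 1 + 1) := by
          rw [show PySem.Int.floordiv (lo + hi + 1) 2 - 1 + 1
              = PySem.Int.floordiv (lo + hi + 1) 2 by ring]
          omega
        obtain ⟨ha, hbb, hcc, hdd⟩ :=
          ih lo (PySem.Int.floordiv (lo + hi + 1) 2 - 1) (by omega) (by omega) hlo h2'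
        exact ⟨ha, by omega, hcc, hdd⟩
    · rw [bloop, if_neg h1]
      have hq : lo = hi := by omega
      exact ⟨le_refl _, hle, hlo, by rw [hq]; exact hhi⟩

theorem bloop_char (food_times : List Int) (k lo hi : Int) (hle : lo ≤ hi)
    (hlo : eaten food_times lo ≤ k) (hhi : k < eaten food_times (hi + 1)) :
    lo ≤ bloop food_times k ((hi - lo).toNat + 1) lo hi ∧
      bloop food_times k ((hi - lo).toNat + 1) lo hi ≤ hi ∧
      eaten food_times (bloop food_times k ((hi - lo).toNat + 1) lo hi) ≤ k ∧
      k < eaten food_times (bloop food_times k ((hi - lo).toNat + 1) lo hi + 1) :=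
  bloop_char_aux food_times k ((hi - lo).toNat + 1) lo hi (by omega) hle hlo hhi

-- the sorted pair list, summed through min(·, T): the same seconds count as eaten(T)
theorem sum_min_P (food_times : List Int) (T : Int) :
    ((PySem.List.sorted2 ((PySem.List.enumerate food_times 0).map (fun p => (p.2, p.1)))
        Prod.fst Prod.snd false).map (fun p => min p.1 T - 0)).sum = eaten food_times T := by
  have hperm := PySem.List.sorted2_perm
    ((PySem.List.enumerate food_times 0).map (fun p => (p.2, p.1))) Prod.fst Prod.snd false
  rw [List.Perm.sum_eq (hperm.map (fun p => min p.1 T - 0))]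
  rw [List.map_map]
  simp only [Function.comp_def, sub_zero]
  rw [show (fun p : Int × Int => min p.2 T) = ((fun x : Int => min x T) ∘ (fun p : Int × Int => p.2))
    from rfl]
  rw [← List.map_map, PySem.List.map_snd_enumerate]
  rfl

-- the surviving indices, as A collects them and as B collects them, are permutations
theorem filter_P_perm (food_times : List Int) (T : Int) :
    (((PySem.List.sorted2 ((PySem.List.enumerate food_times 0).map (fun p => (p.2, p.1)))
        Prod.fst Prod.snd false).filter (fun p => decide (T < p.1))).map Prod.snd).Perm
      (((PySem.List.enumerate food_times 0).filter (fun p => decide (T < p.2))).map Prod.fst) := by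
  have hperm := PySem.List.sorted2_perm
    ((PySem.List.enumerate food_times 0).map (fun p => (p.2, p.1))) Prod.fst Prod.snd false
  have h2 := (hperm.filter (fun p => decide (T < p.1))).map Prod.snd
  rw [List.filter_map, List.map_map] at h2
  exact h2

-- B's survivor list is strictly increasing (indices of enumerate, filtered)
theorem survivors_pairwise (food_times : List Int) (T : Int) :
    (((PySem.List.enumerate food_times 0).filter (fun p => decide (T < p.2))).map
      Prod.fst).Pairwise (· < ·) := by
  apply List.pairwise_map.mpr
  exact ((PySem.List.pairwise_lt_enumerate food_times 0).filter _).imp (fun h => h)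

-- hence A's final sort of the surviving indices returns exactly B's survivor list
theorem survivors_sorted_eq (food_times : List Int) (T : Int) :
    PySem.List.sorted
      (((PySem.List.sorted2 ((PySem.List.enumerate food_times 0).map (fun p => (p.2, p.1)))
          Prod.fst Prod.snd false).filter (fun p => decide (T < p.1))).map Prod.snd)
      (fun x => x) false
    = ((PySem.List.enumerate food_times 0).filter (fun p => decide (T < p.2))).map Prod.fst := by
  apply PySem.List.sorted_eq_of_perm_of_pairwise_lt
  · exact (filter_P_perm food_times T).symm
  · exact survivors_pairwise food_times T

theorem filter_P_length (food_times : List Int) (T : Int) :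
    (((PySem.List.sorted2 ((PySem.List.enumerate food_times 0).map (fun p => (p.2, p.1)))
        Prod.fst Prod.snd false).filter (fun p => decide (T < p.1))).length : Int)
    = ((((PySem.List.enumerate food_times 0).filter (fun p => decide (T < p.2))).map
        Prod.fst).length : Int) := by
  have h := (filter_P_perm food_times T).length_eq
  rw [List.length_map] at h
  exact_mod_cast h

-- ===== VERDICT (by name: the statement is the Claim_ definition above) =====
theorem solution_spec : Claim_equal_solution := by
  intro food_times k _ hpre
  unfold Spec_solution solution solution_alt
  by_cases hs : food_times.sum ≤ k
  · rw [if_pos hs, if_pos hs]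
  · rw [if_neg hs, if_neg hs]
    have hfne : food_times ≠ [] := by
      rintro rfl
      simp only [List.sum_nil, not_le] at hs
      rcases hpre with h | h
      · exact h rfl
      · omega
    have hks : k < food_times.sum := not_le.mp hs
    obtain ⟨mv, hmv⟩ : ∃ mv, PySem.List.min? food_times (fun y => y) = some mv := by
      cases hmm : PySem.List.min? food_times (fun y => y) with
      | none => exact absurd ((PySem.List.min?_eq_none_iff _ _).mp hmm) hfne
      | some v => exact ⟨v, rfl⟩
    obtain ⟨Mv, hMv⟩ : ∃ Mv, PySem.List.max? food_times (fun y => y) = some Mv := by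
      cases hmm : PySem.List.max? food_times (fun y => y) with
      | none => exact absurd ((PySem.List.max?_eq_none_iff _ _).mp hmm) hfne
      | some v => exact ⟨v, rfl⟩
    have hm := PySem.List.min?_isMin hmv
    have hM := PySem.List.max?_isMax hMv
    rw [hmv, hMv]
    simp only [Option.getD_some]
    have hn0 : (0 : Int) < (food_times.length : Int) := by
      have := List.length_pos_iff.mpr hfne
      exact_mod_cast this
    have hfd : (food_times.length : Int) * PySem.Int.floordiv k (food_times.length : Int) ≤ k := by
      have := (PySem.Int.le_floordiv_iff_mul_le (a := k) (b := (food_times.length : Int))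
        (q := PySem.Int.floordiv k (food_times.length : Int)) hn0).mp (le_refl _)
      linarith [mul_comm (PySem.Int.floordiv k (food_times.length : Int)) (food_times.length : Int)]
    have hlo_le : eaten food_times
        (min mv (PySem.Int.floordiv k (food_times.length : Int))) ≤ k := by
      unfold eaten
      have hcg : ∀ t ∈ food_times, (fun x => min x
            (min mv (PySem.Int.floordiv k (food_times.length : Int)))) t
          = (fun _ : Int => min mv (PySem.Int.floordiv k (food_times.length : Int))) t := by
        intro t ht
        have := hm t ht
        simp only []
        omega
      rw [List.map_congr_left hcg, PySem.List.sum_map_const_int]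
      have h1 : (food_times.length : Int) * min mv (PySem.Int.floordiv k (food_times.length : Int))
          ≤ (food_times.length : Int) * PySem.Int.floordiv k (food_times.length : Int) :=
        mul_le_mul_of_nonneg_left (min_le_right _ _) (le_of_lt hn0)
      linarith
    have heM : eaten food_times Mv = food_times.sum := by
      unfold eaten
      have hcg : ∀ t ∈ food_times, (fun x => min x Mv) t = (fun x : Int => x) t := by
        intro t ht
        have := hM t ht
        simp only []
        omega
      rw [List.map_congr_left hcg, List.map_id']
    have hhi : k < eaten food_times (Mv - 1 + 1) := by
      rw [show Mv - 1 + 1 = Mv by ring, heM]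
      exact hks
    have hsumM : food_times.sum ≤ (food_times.length : Int) * Mv := by
      have h1 : (food_times.map (fun t : Int => t)).sum ≤ (food_times.map (fun _ : Int => Mv)).sum :=
        List.sum_le_sum (fun t ht => hM t ht)
      rw [PySem.List.sum_map_const_int, List.map_id'] at h1
      exact h1
    have hlohi : min mv (PySem.Int.floordiv k (food_times.length : Int)) ≤ Mv - 1 := by
      by_contra hc
      push_neg at hc
      have h1 : Mv ≤ PySem.Int.floordiv k (food_times.length : Int) := by omega
      have h2 : (food_times.length : Int) * Mv
          ≤ (food_times.length : Int) * PySem.Int.floordiv k (food_times.length : Int) :=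
        mul_le_mul_of_nonneg_left h1 (le_of_lt hn0)
      linarith
    obtain ⟨hT1, hT2, hT3, hT4⟩ := bloop_char food_times k
      (min mv (PySem.Int.floordiv k (food_times.length : Int))) (Mv - 1) hlohi hlo_le hhi
    -- A's side: heap loop = sweep along the sorted pair list
    rw [build_eq_sorted]
    conv_lhs => rw [← length_build food_times]
    have hne : (PySem.List.sorted2 ((PySem.List.enumerate food_times 0).map (fun p => (p.2, p.1)))
        Prod.fst Prod.snd false) ≠ [] := by
      intro h0
      have hl := length_build food_times
      rw [h0] at hl
      simp only [List.length_nil, Nat.cast_zero] at hl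
      have : food_times.length = 0 := by exact_mod_cast hl.symm
      exact hfne (List.length_eq_zero_iff.mp this)
    have hsum : (((PySem.List.sorted2 ((PySem.List.enumerate food_times 0).map
          (fun p => (p.2, p.1))) Prod.fst Prod.snd false)).map Prod.fst).sum
        = food_times.sum := by
      have hp := (PySem.List.sorted2_perm ((PySem.List.enumerate food_times 0).map
        (fun p => (p.2, p.1))) Prod.fst Prod.snd false).map Prod.fst
      have := hp.sum_eq
      simpa [List.map_map, Function.comp_def, PySem.List.map_snd_enumerate] using this
    rw [loop_eq _ 0 k hne (by rw [hsum]; simpa using hks)]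
    rw [sweep_main (bloop food_times k
        ((Mv - 1 - min mv (PySem.Int.floordiv k (food_times.length : Int))).toNat + 1)
        (min mv (PySem.Int.floordiv k (food_times.length : Int))) (Mv - 1)) _ 0 k
      (pairwise_fst_sorted2 food_times)
      (by rw [sum_min_P]; exact hT3)
      (by rw [sum_min_P]; exact hT4)]
    rw [survivors_sorted_eq, sum_min_P, filter_P_length]
    rfl
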